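-- pv_equiv track=rewrite | github.com/al-roz/IDA-Script-Framework | IDA/utils.py | replace_incorrect_symbols_in_name
-- ===== SOURCE A (Python) =====
-- def replace_incorrect_symbols_in_name(name):
--     incorrect_symbols = '-,.<>[]~@$^%&*()'
--     replacement_char = '_'
--
--     result = name
--
--     if name:
--         for symbol in incorrect_symbols:
--             result = result.replace(symbol, replacement_char)
--
--     return result
-- ===== SOURCE B (Python) =====
-- def replace_incorrect_symbols_in_name(name):
--     if not name:
--         return name
--     bad = set('-,.<>[]~@$^%&*()')
--     return ''.join('_' if c in bad else c for c in name)
-- ===== Notes on version B (the rewrite author's own statement) =====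
-- stated objective: idiomatic
-- what changed: Replaces A's sixteen sequential whole-string str.replace scans with a single character-by-character pass testing membership in a precomputed set.
import Mathlib
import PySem

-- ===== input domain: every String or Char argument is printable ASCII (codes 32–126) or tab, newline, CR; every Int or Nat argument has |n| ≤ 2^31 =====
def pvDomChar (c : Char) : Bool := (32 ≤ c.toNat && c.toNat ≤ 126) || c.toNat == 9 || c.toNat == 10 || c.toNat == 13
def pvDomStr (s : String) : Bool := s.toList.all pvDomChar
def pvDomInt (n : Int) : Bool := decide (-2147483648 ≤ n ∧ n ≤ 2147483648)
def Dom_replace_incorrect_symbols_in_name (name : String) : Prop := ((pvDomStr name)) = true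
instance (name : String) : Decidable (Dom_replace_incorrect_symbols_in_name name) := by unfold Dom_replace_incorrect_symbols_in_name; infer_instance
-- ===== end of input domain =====

-- ===== PORT A =====
def replace_incorrect_symbols_in_name (name : String) : String :=
  let incorrect_symbols : String := "-,.<>[]~@$^%&*()"
  let replacement_char : String := "_"
  let result := name
  if name ≠ "" then
    incorrect_symbols.toList.foldl
      (fun r symbol => PySem.Str.replace r (String.ofList [symbol]) replacement_char) result
  else result

-- ===== PORT B =====
-- B: early return on empty, then one pass mapping each character through a set-membership test
def replace_incorrect_symbols_in_name_alt (name : String) : String :=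
  if name = "" then name
  else
    let bad : PySem.Set Char := PySem.Set.ofList "-,.<>[]~@$^%&*()".toList
    String.ofList (name.toList.map (fun c => if PySem.Set.contains bad c then '_' else c))

-- ===== PRECONDITION & SPEC =====
def Spec_replace_incorrect_symbols_in_name (name : String) (out : String) : Prop := out = replace_incorrect_symbols_in_name_alt name
instance (name : String) (out : String) : Decidable (Spec_replace_incorrect_symbols_in_name name out) := by unfold Spec_replace_incorrect_symbols_in_name; infer_instance

-- ===== CLAIM (what is proved, stated in full; the proofs are below) =====
def Claim_equal_replace_incorrect_symbols_in_name : Prop := ∀ (name : String), Dom_replace_incorrect_symbols_in_name name → Spec_replace_incorrect_symbols_in_name name (replace_incorrect_symbols_in_name name)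

-- ===== LEMMAS AND PROOFS =====

-- replace with a single-char pattern is a character map
theorem go_single (a b : Char) (l : List Char) (acc : List Char) (fuel : Nat)
    (h : l.length ≤ fuel) :
    PySem.Chars.replace.go [a] [b] fuel l acc
      = acc.reverse ++ l.map (fun c => if c = a then b else c) := by
  induction l generalizing fuel acc with
  | nil =>
    cases fuel <;> simp [PySem.Chars.replace.go]
  | cons c t ih =>
    cases fuel with
    | zero => simp at h
    | succ fuel =>
      simp only [List.length_cons, Nat.succ_le_succ_iff] at h
      by_cases hca : a = c
      · subst hca
        simp only [PySem.Chars.replace.go, List.isPrefixOf, BEq.rfl, List.isPrefixOf_nil_left,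
          Bool.and_true, if_pos, List.length_cons, List.length_nil, List.drop_succ_cons,
          List.drop_zero, List.reverse_cons, List.reverse_nil]
        rw [ih _ _ h]
        simp
      · have hpre : [a].isPrefixOf (c :: t) = false := by
          simp [List.isPrefixOf, hca]
        simp only [PySem.Chars.replace.go, hpre, Bool.false_eq_true, if_neg, not_false_iff]
        rw [ih _ _ h]
        have : (if c = a then b else c) = c := if_neg (fun h' => hca h'.symm)
        simp [this]

theorem replace_single (a b : Char) (s : String) :
    PySem.Str.replace s (String.ofList [a]) (String.ofList [b])
      = String.ofList (s.toList.map (fun c => if c = a then b else c)) := by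
  rw [← String.toList_inj]
  rw [PySem.Str.toList_replace]
  simp only [String.toList_ofList]
  rw [PySem.Chars.replace]
  simp only [List.isEmpty_cons, if_neg, Bool.false_eq_true, not_false_iff]
  exact go_single a b s.toList [] s.toList.length (le_refl _)

theorem foldl_replace (syms : List Char) (hs : '_' ∉ syms) (s : String) :
    syms.foldl (fun r a => PySem.Str.replace r (String.ofList [a]) "_") s
      = String.ofList (s.toList.map (fun c => if c ∈ syms then '_' else c)) := by
  induction syms generalizing s with
  | nil =>
    rw [← String.toList_inj]
    simp
  | cons a t ih =>
    simp only [List.mem_cons, not_or] at hs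
    have h1 : ("_" : String) = String.ofList ['_'] := rfl
    rw [List.foldl_cons, h1, replace_single, ih hs.2, ← String.toList_inj]
    simp only [String.toList_ofList, List.map_map]
    apply List.map_congr_left
    intro c _
    simp only [Function.comp]
    by_cases hca : c = a
    · subst hca
      simp only [if_pos rfl, List.mem_cons, true_or, if_pos]
      split <;> rfl
    · simp [hca]

-- ===== VERDICT (by name: the statement is the Claim_ definition above) =====
theorem replace_incorrect_symbols_in_name_spec : Claim_equal_replace_incorrect_symbols_in_name := by
  intro name _
  unfold Spec_replace_incorrect_symbols_in_name
  unfold replace_incorrect_symbols_in_name replace_incorrect_symbols_in_name_alt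
  by_cases h : name = ""
  · simp [h]
  · simp only [h, if_neg, ne_eq, not_false_iff, if_pos]
    rw [foldl_replace _ (by decide)]
    rw [← String.toList_inj]
    simp only [String.toList_ofList]
    apply List.map_congr_left
    intro c _
    by_cases hc : c ∈ "-,.<>[]~@$^%&*()".toList
    · simp [hc, (PySem.Set.mem_ofList _ _).2 hc, PySem.Set.contains]
    · simp [hc, PySem.Set.contains, fun h => hc ((PySem.Set.mem_ofList _ _).1 h)]
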